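-- pv_equiv track=rewrite | github.com/agusuy/metaheuristics | metaheuristics/test_problems.py | evaluate_boda
-- ===== SOURCE A (Python) =====
-- def evaluate_boda(posiciones_invitados, matriz_afinidad):
--     max_per_table = 6
--     tables = {}
--
--     # Checkea que no haya mesas con mas de max_per_table personas sentadas
--     for invitado_n, mesa in enumerate(posiciones_invitados):
--         tables.setdefault(mesa, [])
--         tables[mesa].append(invitado_n)
--
--     result = 0
--     for people_in_table in tables.values():
--         num_in_table = len(people_in_table)
--         if num_in_table > max_per_table:
--             result += max_per_table - num_in_table
--
--     # Si no hay mesas excedidas, sumar afinidades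
--     for people_in_table in tables.values():
--         for person in people_in_table:
--             for other_person in people_in_table:
--                 result += matriz_afinidad[person][other_person]
--
--     return result
-- ===== SOURCE B (Python) =====
-- def evaluate_boda(posiciones_invitados, matriz_afinidad):
--     # Occupancy counts instead of per-table guest lists for the overflow penalty.
--     counts = {}
--     for mesa in posiciones_invitados:
--         counts[mesa] = counts.get(mesa, 0) + 1
--
--     result = 0
--     for c in counts.values():
--         if c > 6:
--             result -= c - 6
--
--     # Flat all-pairs same-table scan instead of grouping guests by table.
--     n = len(posiciones_invitados)
--     for i in range(n):
--         for j in range(n):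
--             if posiciones_invitados[i] == posiciones_invitados[j]:
--                 result += matriz_afinidad[i][j]
--     return result
-- ===== Notes on version B (the rewrite author's own statement) =====
-- stated objective: alternative
-- what changed: B replaces A's dict of per-table guest lists by a plain occupancy counter for the penalty and a flat all-ordered-pairs same-table scan over guest indices for the affinity sum, never materializing the groups.
import Mathlib
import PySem

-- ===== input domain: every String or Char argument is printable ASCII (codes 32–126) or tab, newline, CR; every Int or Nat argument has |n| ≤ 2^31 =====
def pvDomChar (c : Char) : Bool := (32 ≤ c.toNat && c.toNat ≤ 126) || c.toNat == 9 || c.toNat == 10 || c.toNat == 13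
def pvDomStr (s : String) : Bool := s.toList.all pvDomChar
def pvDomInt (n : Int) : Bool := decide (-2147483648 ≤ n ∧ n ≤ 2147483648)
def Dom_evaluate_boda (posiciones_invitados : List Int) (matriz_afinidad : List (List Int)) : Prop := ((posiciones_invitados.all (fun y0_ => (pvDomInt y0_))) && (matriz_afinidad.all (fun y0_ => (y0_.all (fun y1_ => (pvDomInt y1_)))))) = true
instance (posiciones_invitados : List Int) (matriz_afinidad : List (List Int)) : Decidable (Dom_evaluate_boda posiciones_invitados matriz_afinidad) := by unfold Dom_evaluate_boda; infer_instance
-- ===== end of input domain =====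

-- B replaces A's dict of per-table guest lists by an occupancy counter (penalty) plus a flat
-- all-ordered-pairs same-table index scan (affinity); alternative decomposition, same asymptotic cost.


-- ===== PORT A =====
def evaluate_boda (posiciones_invitados : List Int) (matriz_afinidad : List (List Int)) : Int :=
  -- tables.setdefault(mesa, []); tables[mesa].append(invitado_n)  ==  modify mesa [] (· ++ [invitado_n])
  let tables : PySem.Dict Int (List Int) :=
    (PySem.List.enumerate posiciones_invitados).foldl
      (fun d p => d.modify p.2 [] (fun l => l ++ [p.1])) PySem.Dict.empty
  let result : Int :=
    tables.values.foldl
      (fun r people => if ((people.length : Int) > 6) then r + (6 - (people.length : Int)) else r) 0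
  tables.values.foldl
    (fun r people =>
      people.foldl
        (fun r person =>
          people.foldl
            (fun r other =>
              r + PySem.List.pyGetD (PySem.List.pyGetD matriz_afinidad person []) other 0)
            r)
        r)
    result

-- ===== PORT B =====
def evaluate_boda_alt (posiciones_invitados : List Int) (matriz_afinidad : List (List Int)) : Int :=
  let counts : PySem.Dict Int Int :=
    posiciones_invitados.foldl (fun d mesa => d.insert mesa (d.getD mesa 0 + 1)) PySem.Dict.empty
  let result : Int :=
    counts.values.foldl (fun r c => if c > 6 then r - (c - 6) else r) 0
  let n : Int := posiciones_invitados.length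
  (PySem.List.pyRange 0 n 1).foldl
    (fun r i =>
      (PySem.List.pyRange 0 n 1).foldl
        (fun r j =>
          if PySem.List.pyGetD posiciones_invitados i 0 = PySem.List.pyGetD posiciones_invitados j 0
          then r + PySem.List.pyGetD (PySem.List.pyGetD matriz_afinidad i []) j 0
          else r)
        r)
    result

-- ===== PRECONDITION & SPEC =====
-- Pre_ excludes exactly the inputs where Python A raises IndexError: some same-table ordered
-- pair (i, j) of guest indices has matriz_afinidad[i][j] out of range.
def Pre_evaluate_boda (posiciones_invitados : List Int) (matriz_afinidad : List (List Int)) : Prop :=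
  ∀ i ∈ List.range posiciones_invitados.length, ∀ j ∈ List.range posiciones_invitados.length,
    posiciones_invitados.getD i 0 = posiciones_invitados.getD j 0 →
      i < matriz_afinidad.length ∧ j < (matriz_afinidad.getD i []).length
instance (posiciones_invitados : List Int) (matriz_afinidad : List (List Int)) : Decidable (Pre_evaluate_boda posiciones_invitados matriz_afinidad) := by unfold Pre_evaluate_boda; infer_instance
def pvWitness_evaluate_boda : List Int × List (List Int) := ([0, 0, 1], [[1, 2, 3], [4, 5, 6], [7, 8, 9]])
def Spec_evaluate_boda (posiciones_invitados : List Int) (matriz_afinidad : List (List Int)) (out : Int) : Prop := out = evaluate_boda_alt posiciones_invitados matriz_afinidad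
instance (posiciones_invitados : List Int) (matriz_afinidad : List (List Int)) (out : Int) : Decidable (Spec_evaluate_boda posiciones_invitados matriz_afinidad out) := by unfold Spec_evaluate_boda; infer_instance

-- ===== CLAIM (what is proved, stated in full; the proofs are below) =====
def Claim_equal_evaluate_boda : Prop := ∀ (posiciones_invitados : List Int) (matriz_afinidad : List (List Int)), Dom_evaluate_boda posiciones_invitados matriz_afinidad → Pre_evaluate_boda posiciones_invitados matriz_afinidad → Spec_evaluate_boda posiciones_invitados matriz_afinidad (evaluate_boda posiciones_invitados matriz_afinidad)

-- ===== LEMMAS AND PROOFS =====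
-- Common normal form: both ports equal
--   Σ_{m ∈ distinct tables} pen(|group m|) + Σ_{m} Σ_{p ∈ group m} Σ_{q ∈ group m} M[p][q].

-- the distinct tables, in first-occurrence order
def pvKeys (pos : List Int) : List Int := PySem.Set.ofList pos
-- guest indices (as Int) seated at table m, in increasing order
def pvGrp (pos : List Int) (m : Int) : List Int :=
  (PySem.List.pyRange 0 (pos.length : Int) 1).filter
    (fun i => decide (PySem.List.pyGetD pos i 0 = m))
def pvPen (c : Int) : Int := if c > 6 then 6 - c else 0
def pvAff (M : List (List Int)) (p q : Int) : Int :=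
  PySem.List.pyGetD (PySem.List.pyGetD M p []) q 0

-- A's dict of per-table guest lists, characterized entry-wise
theorem pv_tables_getD (pos : List Int) (m : Int) :
    ((PySem.List.enumerate pos).foldl
      (fun d p => d.modify p.2 [] (fun l => l ++ [p.1])) PySem.Dict.empty).getD m []
    = pvGrp pos m := by
  rw [PySem.List.enumerate_eq_map_pyRange (d := 0)]
  rw [List.foldl_map]
  have : (PySem.List.pyRange 0 (PySem.List.len pos) 1).foldl
      (fun d j => d.modify (PySem.List.pyGetD pos j 0) [] (fun l => l ++ [j])) PySem.Dict.empty
    = ((PySem.List.pyRange 0 (PySem.List.len pos) 1).map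
        (fun j => (PySem.List.pyGetD pos j 0, j))).foldl
      (fun d p => d.modify p.1 [] (fun l => l ++ [p.2])) PySem.Dict.empty := by
    rw [List.foldl_map]
  rw [this, PySem.Dict.getD_foldl_modify_append]
  simp only [List.filter_map, List.map_map, pvGrp, PySem.List.len]
  rw [List.filter_congr (q := fun i => decide (PySem.List.pyGetD pos i 0 = m)) ?_]
  · simp [Function.comp_def]
  · intro x _
    by_cases h : PySem.List.pyGetD pos x 0 = m <;> simp [h]

theorem pv_tables_values (pos : List Int) :
    ((PySem.List.enumerate pos).foldl
      (fun d p => d.modify p.2 [] (fun l => l ++ [p.1])) PySem.Dict.empty).values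
    = (pvKeys pos).map (pvGrp pos) := by
  have hkeys : ((PySem.List.enumerate pos).foldl
      (fun d p => d.modify p.2 [] (fun l => l ++ [p.1])) PySem.Dict.empty).keys
      = pvKeys pos := by
    rw [PySem.Dict.keys_foldl_modify_key (PySem.List.enumerate pos) (fun p => p.2) []
      (fun _ p l => l ++ [p.1]) PySem.Dict.empty]
    simp [PySem.List.map_snd_enumerate, pvKeys, PySem.Set.update,
      PySem.Set.ofList_eq_foldl, PySem.Dict.keys_empty]
  have hnd : ((PySem.List.enumerate pos).foldl
      (fun d p => d.modify p.2 [] (fun l => l ++ [p.1])) PySem.Dict.empty).keys.Nodup := by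
    exact PySem.Dict.nodup_keys_foldl_modify_key _ _ _ _ _ (by simp [PySem.Dict.keys_empty])
  rw [PySem.Dict.values_eq_map_keys _ hnd [], hkeys]
  exact List.map_congr_left (fun m _ => pv_tables_getD pos m)

theorem evaluate_boda_eq (pos : List Int) (M : List (List Int)) :
    evaluate_boda pos M
      = ((pvKeys pos).map (fun m => pvPen ((pvGrp pos m).length : Int))).sum
        + ((pvKeys pos).map (fun m =>
            ((pvGrp pos m).map (fun p => ((pvGrp pos m).map (fun q => pvAff M p q)).sum)).sum)).sum := by
  simp only [evaluate_boda, pv_tables_values, List.foldl_map]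
  -- affinity loop (the outermost foldl)
  rw [PySem.List.foldl_congr_mem _ _
      (fun (r : Int) (m : Int) =>
        r + ((pvGrp pos m).map (fun p => ((pvGrp pos m).map (fun q => pvAff M p q)).sum)).sum) _ ?haff]
  case haff =>
    intro acc m _
    rw [PySem.List.foldl_congr_mem _ _
        (fun (r : Int) (p : Int) => r + ((pvGrp pos m).map (fun q => pvAff M p q)).sum) _ ?hin,
      PySem.List.foldl_add]
    case hin =>
      intro acc' p _
      rw [PySem.List.foldl_add]
      rfl
  rw [PySem.List.foldl_add]
  -- penalty loop
  rw [PySem.List.foldl_congr_mem _ _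
      (fun (r : Int) (m : Int) => r + pvPen ((pvGrp pos m).length : Int)) _ ?hpen,
    PySem.List.foldl_add]
  case hpen =>
    intro acc m _
    by_cases h : ((pvGrp pos m).length : Int) > 6 <;> simp [pvPen, h]
  ring

theorem pv_sum_single {κ : Type} [DecidableEq κ] (c : κ → Int) (v : κ) :
    ∀ (ks : List κ), ks.Nodup → v ∈ ks →
      (ks.map (fun m => if v = m then c m else 0)).sum = c v := by
  intro ks
  induction ks with
  | nil => intro _ h; simp at h
  | cons k t ih =>
    intro hnd hm
    rcases List.nodup_cons.1 hnd with ⟨hk, hnt⟩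
    simp only [List.map_cons, List.sum_cons]
    rcases List.mem_cons.1 hm with h | h
    · subst h
      have : (t.map (fun m => if v = m then c m else 0)).sum = 0 := by
        rw [List.sum_eq_zero]
        intro x hx
        rcases List.mem_map.1 hx with ⟨m, hm', rfl⟩
        have : v ≠ m := fun e => hk (e ▸ hm')
        simp [this]
      simp [this]
    · have hvk : v ≠ k := fun e => hk (e ▸ h)
      rw [ih hnt h]; simp [hvk]

-- summing over a list equals summing it fiber by fiber over the distinct keys
theorem pv_partition_sum {α κ : Type} [DecidableEq κ] (g : α → Int) (key : α → κ) :
    ∀ (l : List α) (ks : List κ), ks.Nodup → (∀ x ∈ l, key x ∈ ks) →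
      (l.map g).sum
        = (ks.map (fun m => ((l.filter (fun x => decide (key x = m))).map g).sum)).sum := by
  intro l
  induction l with
  | nil => intro ks _ _; simp
  | cons x t ih =>
    intro ks hnd hcov
    have hx := hcov x (List.mem_cons_self ..)
    have hrec := ih ks hnd (fun y hy => hcov y (List.mem_cons_of_mem _ hy))
    simp only [List.map_cons, List.sum_cons, hrec]
    have : ∀ m, ((List.filter (fun y => decide (key y = m)) (x :: t)).map g).sum
        = (if key x = m then g x else 0)
          + ((List.filter (fun y => decide (key y = m)) t).map g).sum := by
      intro m
      by_cases h : key x = m <;> simp [h]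
    calc g x + (ks.map (fun m => ((t.filter (fun y => decide (key y = m))).map g).sum)).sum
        = (ks.map (fun m => (if key x = m then g x else 0))).sum
          + (ks.map (fun m => ((t.filter (fun y => decide (key y = m))).map g).sum)).sum := by
          rw [pv_sum_single (fun m => g x) (key x) ks hnd hx]
      _ = (ks.map (fun m => ((List.filter (fun y => decide (key y = m)) (x :: t)).map g).sum)).sum := by
          rw [← PySem.List.sum_map_add_int]
          exact congrArg List.sum (List.map_congr_left (fun m _ => (this m).symm))

theorem pv_flatten_singleton {α β : Type} (f : α → β) :
    ∀ (l : List α), (List.map (fun a => [f a]) l).flatten = l.map f := by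
  intro l
  induction l with
  | nil => rfl
  | cons x t ih => simp [ih]

-- pos as a table of its own getD values
theorem pv_pos_map (pos : List Int) :
    (List.range pos.length).map (fun k => pos.getD k 0) = pos := by
  apply List.ext_getElem
  · simp
  · intro i h1 h2
    simp [List.getD_eq_getElem?_getD, List.getElem?_eq_getElem h2]

theorem pv_grp_eq_map (pos : List Int) (m : Int) :
    pvGrp pos m
      = ((List.range pos.length).filter (fun k => decide (pos.getD k 0 = m))).map (fun k => (k : Int)) := by
  rw [pvGrp, PySem.List.pyRange_zero_natCast, List.filter_map]
  rw [List.filter_congr (l := List.range pos.length)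
      (q := fun k => decide (pos.getD k 0 = m)) ?_]
  · simp [List.flatMap_def, pv_flatten_singleton]
  · intro k _
    simp [Function.comp, PySem.List.pyGetD_natCast]

theorem pv_count_eq (pos : List Int) (m : Int) :
    (pos.count m : Int) = ((pvGrp pos m).length : Int) := by
  have h2 : (pvGrp pos m).length
      = (List.range pos.length).countP (fun k => decide (pos.getD k 0 = m)) := by
    rw [pv_grp_eq_map, List.countP_eq_length_filter, List.length_map]
    simp
  rw [h2]
  congr 1
  conv_lhs => rw [← pv_pos_map pos]
  rw [List.count_eq_countP, List.countP_map]
  apply List.countP_congr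
  intro k _
  simp [Function.comp]

theorem evaluate_boda_alt_eq (pos : List Int) (M : List (List Int)) :
    evaluate_boda_alt pos M
      = ((pvKeys pos).map (fun m => pvPen ((pvGrp pos m).length : Int))).sum
        + ((pvKeys pos).map (fun m =>
            ((pvGrp pos m).map (fun p => ((pvGrp pos m).map (fun q => pvAff M p q)).sum)).sum)).sum := by
  have hvals : (pos.foldl (fun d mesa => d.insert mesa (d.getD mesa 0 + 1)) PySem.Dict.empty).values
      = (pvKeys pos).map (fun m => ((pos.count m : Nat) : Int)) := by
    rw [PySem.Dict.foldl_insert_getD_add_one_eq_counter]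
    show (PySem.Dict.counter pos).items.map (fun p => p.2) = _
    rw [PySem.Dict.items_counter, List.map_map]
    rfl
  simp only [evaluate_boda_alt, hvals, List.foldl_map]
  -- affinity double loop
  rw [PySem.List.foldl_congr_mem _ _
      (fun (r : Int) (i : Int) =>
        r + ((pvGrp pos (PySem.List.pyGetD pos i 0)).map (fun j => pvAff M i j)).sum) _ ?hrow]
  case hrow =>
    intro acc i _
    rw [PySem.List.foldl_ite_eq_foldl_filter
        (p := fun j => PySem.List.pyGetD pos i 0 = PySem.List.pyGetD pos j 0)
        (f := fun r j => r + PySem.List.pyGetD (PySem.List.pyGetD M i []) j 0),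
      PySem.List.foldl_add]
    have : (PySem.List.pyRange 0 (pos.length : Int) 1).filter
          (fun j => decide (PySem.List.pyGetD pos i 0 = PySem.List.pyGetD pos j 0))
        = pvGrp pos (PySem.List.pyGetD pos i 0) := by
      rw [pvGrp]
      apply List.filter_congr
      intro j _
      by_cases h : PySem.List.pyGetD pos i 0 = PySem.List.pyGetD pos j 0
      · simp [h]
      · simp [h]
        exact fun e => h (Eq.symm e)
    rw [this]
    rfl
  rw [PySem.List.foldl_add]
  -- penalty loop
  rw [PySem.List.foldl_congr_mem _ _
      (fun (r : Int) (m : Int) => r + pvPen ((pos.count m : Nat) : Int)) _ ?hpen,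
    PySem.List.foldl_add]
  case hpen =>
    intro acc m _
    by_cases h : ((pos.count m : Nat) : Int) > 6
    · simp [pvPen, h]; ring
    · simp [pvPen, h]
  -- identify the pieces: partition the index scan by table, rewrite counts to group sizes
  have hcov : ∀ i ∈ PySem.List.pyRange 0 (pos.length : Int) 1,
      PySem.List.pyGetD pos i 0 ∈ pvKeys pos := by
    intro i hi
    rcases PySem.List.mem_pyRange_one.1 hi with ⟨h0, hn⟩
    rcases Int.eq_ofNat_of_zero_le h0 with ⟨k, rfl⟩
    have hk : k < pos.length := by exact_mod_cast hn
    rw [PySem.List.pyGetD_natCast, List.getD_eq_getElem _ _ hk]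
    exact (PySem.Set.mem_ofList pos _).2 (List.getElem_mem hk)
  have hpart := pv_partition_sum
      (fun i => ((pvGrp pos (PySem.List.pyGetD pos i 0)).map (fun j => pvAff M i j)).sum)
      (fun i => PySem.List.pyGetD pos i 0)
      (PySem.List.pyRange 0 (pos.length : Int) 1) (pvKeys pos)
      (PySem.Set.nodup_ofList pos) hcov
  rw [hpart]
  have hfix : ∀ m, ((PySem.List.pyRange 0 (pos.length : Int) 1).filter
        (fun i => decide (PySem.List.pyGetD pos i 0 = m)))
      = pvGrp pos m := fun m => rfl
  have hinner : ∀ m, ((pvGrp pos m).map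
        (fun i => ((pvGrp pos (PySem.List.pyGetD pos i 0)).map (fun j => pvAff M i j)).sum))
      = ((pvGrp pos m).map (fun i => ((pvGrp pos m).map (fun j => pvAff M i j)).sum)) := by
    intro m
    apply List.map_congr_left
    intro i hi
    have : PySem.List.pyGetD pos i 0 = m := by
      have := List.of_mem_filter hi
      exact of_decide_eq_true this
    rw [this]
  have hpen2 : ∀ m ∈ pvKeys pos, pvPen ((pos.count m : Nat) : Int) = pvPen ((pvGrp pos m).length : Int) := by
    intro m _
    rw [pv_count_eq]
  calc (0 + ((pvKeys pos).map (fun m => pvPen ((pos.count m : Nat) : Int))).sum)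
        + ((pvKeys pos).map (fun m => (((PySem.List.pyRange 0 (pos.length : Int) 1).filter
            (fun i => decide (PySem.List.pyGetD pos i 0 = m))).map
              (fun i => ((pvGrp pos (PySem.List.pyGetD pos i 0)).map (fun j => pvAff M i j)).sum)).sum)).sum
      = ((pvKeys pos).map (fun m => pvPen ((pvGrp pos m).length : Int))).sum
        + ((pvKeys pos).map (fun m =>
            ((pvGrp pos m).map (fun p => ((pvGrp pos m).map (fun q => pvAff M p q)).sum)).sum)).sum := by
        rw [zero_add]
        congr 1
        · exact congrArg List.sum (List.map_congr_left hpen2)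
        · apply congrArg List.sum
          apply List.map_congr_left
          intro m _
          rw [hfix m, hinner m]

-- ===== VERDICT (by name: the statement is the Claim_ definition above) =====
theorem evaluate_boda_spec : Claim_equal_evaluate_boda := by
  intro pos M _ _
  unfold Spec_evaluate_boda
  rw [evaluate_boda_eq, evaluate_boda_alt_eq]
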